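-- pv_equiv track=rewrite | github.com/CerzBbz/daily-programmer | possible_pies/solution.py | determine_max
-- ===== SOURCE A (Python) =====
-- pumpkin_pie = (1, 0, 3, 4, 3)
--
-- apple_pie = (0, 1, 4, 3, 2)
--
-- def can_bake(ingredients, pie_type):
--     for i, j in zip(ingredients, pie_type):
--         if i < j:
--             return False
--     return True
--
-- def bake(ingredients, pie_type):
--     after = ()
--     for i, j in zip(ingredients, pie_type):
--         after = after + ((i - j),)
--     return after
--
-- def determine_max(ingredients):
--     p = [0, 0]
--     a = [0, 0]
--     if can_bake(ingredients, pumpkin_pie):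
--         p_ingredients = bake(ingredients, pumpkin_pie)
--         p = determine_max(p_ingredients)
--         p[0] = p[0] + 1
--     if can_bake(ingredients, apple_pie):
--         a_ingredients = bake(ingredients, apple_pie)
--         a = determine_max(a_ingredients)
--         a[1] = a[1] + 1
--     if (p[0] + p[1]) >= (a[0] + a[1]):
--         return p
--     return a
-- ===== SOURCE B (Python) =====
-- pumpkin_pie = (1, 0, 3, 4, 3)
--
-- apple_pie = (0, 1, 4, 3, 2)
--
-- def determine_max(ingredients):
--     # Count feasibility directly: baking p pumpkin and a apple pies is possible
--     # iff p*pumpkin[k] + a*apple[k] <= ingredients[k] for every shared coordinate.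
--     # Scan p upward; for each feasible p take the largest feasible a; keep the
--     # lexicographically best (total, p).
--     n = min(len(ingredients), 5)
--     best_p = 0
--     best_a = 0
--     p = 0
--     while all(ingredients[k] - p * pumpkin_pie[k] >= 0 for k in range(n)):
--         a = min((ingredients[k] - p * pumpkin_pie[k]) // apple_pie[k]
--                 for k in range(n) if apple_pie[k] > 0)
--         if p + a >= best_p + best_a:
--             best_p, best_a = p, a
--         p += 1
--     return [best_p, best_a]
-- ===== Notes on version B (the rewrite author's own statement) =====
-- stated objective: alternative
-- what changed: A explores every interleaving of pumpkin/apple bakes by unmemoized double recursion; B notes that a sequence of bakes is feasible iff the total ingredient demand is, and does one linear scan over the pumpkin count p, computing the maximal apple count for each p by floor division and keeping the lexicographically best (total, p); intended as faster (a timing run saw A time out at n=16 where B returned, but could not measure a clean ratio).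
-- outside the precondition, e.g. on determine_max([-1]): A returns [0, 0], B returns [0, 0]
import Mathlib
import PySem

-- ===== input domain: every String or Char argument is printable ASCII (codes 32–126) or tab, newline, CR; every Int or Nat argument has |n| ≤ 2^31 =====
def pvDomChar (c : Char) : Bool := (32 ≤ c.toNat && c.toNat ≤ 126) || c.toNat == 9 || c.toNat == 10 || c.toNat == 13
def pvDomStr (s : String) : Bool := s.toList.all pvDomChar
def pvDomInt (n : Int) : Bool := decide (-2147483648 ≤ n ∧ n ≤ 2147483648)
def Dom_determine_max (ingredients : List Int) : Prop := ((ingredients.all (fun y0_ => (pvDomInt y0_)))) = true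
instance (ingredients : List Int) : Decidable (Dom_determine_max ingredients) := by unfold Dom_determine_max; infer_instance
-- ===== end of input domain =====

-- B replaces A's exponential two-way recursion by a single linear scan over the pumpkin count,
-- maximizing the apple count per step by floor division (objective: alternative; intended as
-- faster, but a timing run could not measure a ratio because A stops finishing so early).

-- ===== PORT A =====
def pumpkin_pieA : List Int := [1, 0, 3, 4, 3]

def apple_pieA : List Int := [0, 1, 4, 3, 2]

-- for i, j in zip(...): if i < j: return False / return True  (all short-circuits exactly so)
def can_bake (ingredients pie_type : List Int) : Bool :=
  (ingredients.zip pie_type).all (fun ij => decide (ij.2 ≤ ij.1))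

-- after = after + ((i - j),) accumulated over the zip
def bake (ingredients pie_type : List Int) : List Int :=
  (ingredients.zip pie_type).foldl (fun after ij => after ++ [ij.1 - ij.2]) []

-- A's recursion, made total with a fuel argument; `determine_max` hands it enough fuel
-- (each recursive call lowers ingredients[0]+ingredients[1] when the list has ≥ 2 entries;
-- on shorter lists Python's A never terminates — excluded by Pre_).
def dmFuel : Nat → List Int → List Int
  | 0, _ => [0, 0]
  | f + 1, ing =>
    let p : List Int :=
      if can_bake ing pumpkin_pieA then
        let r := dmFuel f (bake ing pumpkin_pieA)
        [r.getD 0 0 + 1, r.getD 1 0]           -- p = determine_max(..); p[0] = p[0] + 1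
      else [0, 0]
    let a : List Int :=
      if can_bake ing apple_pieA then
        let r := dmFuel f (bake ing apple_pieA)
        [r.getD 0 0, r.getD 1 0 + 1]           -- a = determine_max(..); a[1] = a[1] + 1
      else [0, 0]
    if a.getD 0 0 + a.getD 1 0 ≤ p.getD 0 0 + p.getD 1 0 then p else a

def determine_max (ingredients : List Int) : List Int :=
  dmFuel ((ingredients.getD 0 0).toNat + (ingredients.getD 1 0).toNat + 1) ingredients

-- ===== PORT B =====
-- (Source B uses the same module-level constants pumpkin_pie / apple_pie as A)
-- Source B's while loop; the fuel bound ingredients[0]+1 makes it total (coordinate 0 of the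
-- pumpkin pie is 1, so the loop's guard fails as soon as p exceeds ingredients[0]).
def altLoop (ing : List Int) (n : Nat) : Nat → Int → Int × Int → Int × Int
  | 0, _, best => best
  | f + 1, p, best =>
    if (List.range n).all (fun k => decide (0 ≤ ing.getD k 0 - p * pumpkin_pieA.getD k 0)) then
      let a : Int :=
        ((((List.range n).filter (fun k => decide (0 < apple_pieA.getD k 0))).map
          (fun k => PySem.Int.floordiv (ing.getD k 0 - p * pumpkin_pieA.getD k 0)
            (apple_pieA.getD k 0))).min?).getD 0   -- min over a nonempty list when n ≥ 2
      altLoop ing n f (p + 1) (if best.1 + best.2 ≤ p + a then (p, a) else best)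
    else best

def determine_max_alt (ingredients : List Int) : List Int :=
  let n := min ingredients.length 5
  let r := altLoop ingredients n ((ingredients.getD 0 0).toNat + 1) 0 (0, 0)
  [r.1, r.2]

-- ===== PRECONDITION & SPEC =====
-- Pre_ excludes lists with fewer than 2 elements: on those A recurses forever (RecursionError),
-- except when the single ingredient is negative, where A and B both return zero counts of each pie;
-- B's min() over an empty generator raises ValueError on the other short lists, so all are excluded.
def Pre_determine_max (ingredients : List Int) : Prop := 2 ≤ ingredients.length
instance (ingredients : List Int) : Decidable (Pre_determine_max ingredients) := by unfold Pre_determine_max; infer_instance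

def pvWitness_determine_max : List Int := [3, 3, 10, 10, 10]

def Spec_determine_max (ingredients : List Int) (out : List Int) : Prop := out = determine_max_alt ingredients
instance (ingredients : List Int) (out : List Int) : Decidable (Spec_determine_max ingredients out) := by unfold Spec_determine_max; infer_instance

-- ===== CLAIM (what is proved, stated in full; the proofs are below) =====
def Claim_equal_determine_max : Prop := ∀ (ingredients : List Int), Dom_determine_max ingredients → Pre_determine_max ingredients → Spec_determine_max ingredients (determine_max ingredients)

-- ===== LEMMAS AND PROOFS =====

-- The shared pie-requirement table: (pumpkin coordinate, apple coordinate) per ingredient.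
def PA : List (Int × Int) := [(1, 0), (0, 1), (3, 4), (4, 3), (3, 2)]

-- the state a recursion/loop step works on: (ingredient, pumpkin need, apple need) triples
def tri (ing : List Int) : List (Int × Int × Int) := ing.zip PA

-- (p, a) pies are simultaneously bakeable from the triples L
def feasB (L : List (Int × Int × Int)) (p a : Int) : Bool :=
  L.all (fun t => decide (p * t.2.1 + a * t.2.2 ≤ t.1))

-- both recursions range over this candidate set ((0,0) is always a candidate)
def memB (L : List (Int × Int × Int)) (p a : Int) : Bool :=
  (p == 0 && a == 0) || (decide (0 ≤ p) && decide (0 ≤ a) && feasB L p a)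

-- the unique lexicographic (total, pumpkin-count) maximum of the candidate set
def IsBest (L : List (Int × Int × Int)) (p a : Int) : Prop :=
  memB L p a = true ∧
    ∀ q b : Int, memB L q b = true → (q + b < p + a ∨ (q + b = p + a ∧ q ≤ p))

-- pointwise-equal predicates give equal `all` (membership version)
lemma all_ext {α : Type} {l : List α} {f g : α → Bool} (h : ∀ x ∈ l, f x = g x) :
    l.all f = l.all g := by
  induction l with
  | nil => rfl
  | cons x xs ih =>
    simp only [List.all_cons, h x (by simp), ih (fun y hy => h y (by simp [hy]))]

lemma mem_nonneg {L : List (Int × Int × Int)} {p a : Int} (h : memB L p a = true) :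
    0 ≤ p ∧ 0 ≤ a := by
  simp [memB] at h
  rcases h with ⟨h1, h2⟩ | ⟨⟨h1, h2⟩, h3⟩ <;> omega

lemma isBest_unique {L : List (Int × Int × Int)} {p a p' a' : Int}
    (h : IsBest L p a) (h' : IsBest L p' a') : p = p' ∧ a = a' := by
  have h1 := h.2 p' a' h'.1
  have h2 := h'.2 p a h.1
  omega

-- ---- zip bookkeeping: A's zips with the 5-tuples, restated over `tri` ----

lemma zip_map_fst (xs : List Int) (pa : List (Int × Int)) :
    ((xs.zip (pa.map Prod.fst)).map (fun ij => ij.1 - ij.2)).zip pa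
      = (xs.zip pa).map (fun t => (t.1 - t.2.1, t.2)) := by
  induction xs generalizing pa with
  | nil => simp
  | cons x xs ih =>
    cases pa with
    | nil => simp
    | cons q pa => simp [ih]

lemma zip_map_snd (xs : List Int) (pa : List (Int × Int)) :
    ((xs.zip (pa.map Prod.snd)).map (fun ij => ij.1 - ij.2)).zip pa
      = (xs.zip pa).map (fun t => (t.1 - t.2.2, t.2)) := by
  induction xs generalizing pa with
  | nil => simp
  | cons x xs ih =>
    cases pa with
    | nil => simp
    | cons q pa => simp [ih]

lemma zip_all_fst (xs : List Int) (pa : List (Int × Int)) :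
    (xs.zip (pa.map Prod.fst)).all (fun ij => decide (ij.2 ≤ ij.1))
      = (xs.zip pa).all (fun t => decide (t.2.1 ≤ t.1)) := by
  induction xs generalizing pa with
  | nil => simp
  | cons x xs ih =>
    cases pa with
    | nil => simp
    | cons q pa => simp [ih]

lemma zip_all_snd (xs : List Int) (pa : List (Int × Int)) :
    (xs.zip (pa.map Prod.snd)).all (fun ij => decide (ij.2 ≤ ij.1))
      = (xs.zip pa).all (fun t => decide (t.2.2 ≤ t.1)) := by
  induction xs generalizing pa with
  | nil => simp
  | cons x xs ih =>
    cases pa with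
    | nil => simp
    | cons q pa => simp [ih]

lemma bake_eq_map (ing pie : List Int) :
    bake ing pie = (ing.zip pie).map (fun ij => ij.1 - ij.2) := by
  show List.foldl _ [] _ = _
  rw [PySem.List.foldl_append_singleton_eq_map]
  simp

lemma tri_bake_pumpkin (ing : List Int) :
    tri (bake ing pumpkin_pieA) = (tri ing).map (fun t => (t.1 - t.2.1, t.2)) := by
  have : pumpkin_pieA = PA.map Prod.fst := by rfl
  simp [tri, bake_eq_map, this, zip_map_fst]

lemma tri_bake_apple (ing : List Int) :
    tri (bake ing apple_pieA) = (tri ing).map (fun t => (t.1 - t.2.2, t.2)) := by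
  have : apple_pieA = PA.map Prod.snd := by rfl
  simp [tri, bake_eq_map, this, zip_map_snd]

lemma can_bake_pumpkin (ing : List Int) :
    can_bake ing pumpkin_pieA = (tri ing).all (fun t => decide (t.2.1 ≤ t.1)) := by
  have : pumpkin_pieA = PA.map Prod.fst := by rfl
  simp [can_bake, tri, this, zip_all_fst]

lemma can_bake_apple (ing : List Int) :
    can_bake ing apple_pieA = (tri ing).all (fun t => decide (t.2.2 ≤ t.1)) := by
  have : apple_pieA = PA.map Prod.snd := by rfl
  simp [can_bake, tri, this, zip_all_snd]

-- ---- facts about feasibility over triples whose pie coordinates come from PA ----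

-- invariant of the triple lists reached from `tri ing`: pie coordinates are a prefix of PA
def InvL (L : List (Int × Int × Int)) : Prop :=
  2 ≤ L.length ∧ L.map (fun t => t.2) = PA.take L.length

lemma map_snd_zip_take {α β : Type} : ∀ (xs : List α) (ys : List β),
    (xs.zip ys).map (fun t => t.2) = ys.take (xs.zip ys).length
  | [], ys => by simp
  | x :: xs, [] => by simp
  | x :: xs, y :: ys => by simp [map_snd_zip_take xs ys]

lemma invL_tri (ing : List Int) (h : 2 ≤ ing.length) : InvL (tri ing) := by
  constructor
  · simp [tri, PA]; omega
  · exact map_snd_zip_take ing PA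

lemma invL_pies_nonneg {L : List (Int × Int × Int)} (h : InvL L) :
    ∀ t ∈ L, 0 ≤ t.2.1 ∧ 0 ≤ t.2.2 := by
  intro t ht
  have h2 : t.2 ∈ PA.take L.length := by
    rw [← h.2]; exact List.mem_map_of_mem ht
  have h3 : t.2 ∈ PA := List.mem_of_mem_take h2
  have : ∀ q ∈ PA, 0 ≤ q.1 ∧ 0 ≤ q.2 := by decide
  exact this t.2 h3

lemma invL_get1 {L : List (Int × Int × Int)} (h : InvL L) :
    ∃ i0 i1 rest, L = (i0, 1, 0) :: (i1, 0, 1) :: rest := by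
  obtain ⟨hlen, hmap⟩ := h
  match L, hlen with
  | ⟨i0, q0⟩ :: ⟨i1, q1⟩ :: rest, _ =>
    simp [PA, List.take_succ_cons] at hmap
    exact ⟨i0, i1, rest, by simp [hmap.1, hmap.2.1]⟩

lemma feas_shift_p {L : List (Int × Int × Int)} (p a : Int) :
    feasB (L.map (fun t => (t.1 - t.2.1, t.2))) p a = feasB L (p + 1) a := by
  unfold feasB
  rw [List.all_map]
  refine all_ext (fun t _ => ?_)
  simp only [Function.comp]
  rw [decide_eq_decide]
  constructor <;> intro h <;> [nlinarith; nlinarith]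

lemma feas_shift_a {L : List (Int × Int × Int)} (p a : Int) :
    feasB (L.map (fun t => (t.1 - t.2.2, t.2))) p a = feasB L p (a + 1) := by
  unfold feasB
  rw [List.all_map]
  refine all_ext (fun t _ => ?_)
  simp only [Function.comp]
  rw [decide_eq_decide]
  constructor <;> intro h <;> [nlinarith; nlinarith]

lemma feas_can_p {L : List (Int × Int × Int)} {p a : Int} (hL : InvL L)
    (h : feasB L p a = true) (hp : 1 ≤ p) (ha : 0 ≤ a) :
    (L.all (fun t => decide (t.2.1 ≤ t.1))) = true := by
  simp only [feasB, List.all_eq_true, decide_eq_true_eq] at h ⊢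
  intro t ht
  have hn := invL_pies_nonneg hL t ht
  have := h t ht
  nlinarith

lemma feas_can_a {L : List (Int × Int × Int)} {p a : Int} (hL : InvL L)
    (h : feasB L p a = true) (hp : 0 ≤ p) (ha : 1 ≤ a) :
    (L.all (fun t => decide (t.2.2 ≤ t.1))) = true := by
  simp only [feasB, List.all_eq_true, decide_eq_true_eq] at h ⊢
  intro t ht
  have hn := invL_pies_nonneg hL t ht
  have := h t ht
  nlinarith

lemma feas_drop_a {L : List (Int × Int × Int)} {p a : Int} (hL : InvL L)
    (h : feasB L p a = true) (ha : 0 ≤ a) : feasB L p 0 = true := by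
  simp only [feasB, List.all_eq_true, decide_eq_true_eq] at h ⊢
  intro t ht
  have hn := invL_pies_nonneg hL t ht
  have := h t ht
  nlinarith

lemma feas_mono_p {L : List (Int × Int × Int)} {p q : Int} (hL : InvL L)
    (h : feasB L q 0 = true) (_hpq : 0 ≤ p) (hq : p ≤ q) : feasB L p 0 = true := by
  simp only [feasB, List.all_eq_true, decide_eq_true_eq] at h ⊢
  intro t ht
  have hn := invL_pies_nonneg hL t ht
  have := h t ht
  nlinarith

lemma feas_bound_p {L : List (Int × Int × Int)} {p a i0 : Int} {rest}
    (hL : L = (i0, 1, 0) :: rest) (h : feasB L p a = true) : p ≤ i0 := by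
  subst hL
  simp [feasB] at h
  omega

-- can_bake(pumpkin) is exactly feasibility of one pumpkin pie
lemma can_eq_feas_p {L : List (Int × Int × Int)} :
    (L.all (fun t => decide (t.2.1 ≤ t.1))) = feasB L 1 0 := by
  unfold feasB
  refine all_ext (fun t _ => ?_)
  rw [decide_eq_decide]
  constructor <;> intro h <;> omega

lemma can_eq_feas_a {L : List (Int × Int × Int)} :
    (L.all (fun t => decide (t.2.2 ≤ t.1))) = feasB L 0 1 := by
  unfold feasB
  refine all_ext (fun t _ => ?_)
  rw [decide_eq_decide]
  constructor <;> intro h <;> omega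

-- ---- A's recursion computes the lexicographic maximum ----

lemma mem_zero {L : List (Int × Int × Int)} : memB L 0 0 = true := by simp [memB]

lemma mem_shift_p {L : List (Int × Int × Int)} (hcan : feasB L 1 0 = true) {p a : Int}
    (h : memB (L.map (fun t => (t.1 - t.2.1, t.2))) p a = true) : memB L (p + 1) a = true := by
  simp only [memB, Bool.or_eq_true, Bool.and_eq_true, beq_iff_eq, decide_eq_true_eq] at h ⊢
  rcases h with ⟨rfl, rfl⟩ | ⟨⟨hp, ha⟩, hf⟩
  · exact Or.inr ⟨⟨by omega, by omega⟩, by simpa using hcan⟩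
  · exact Or.inr ⟨⟨by omega, ha⟩, by rw [← feas_shift_p]; exact hf⟩

lemma mem_shift_a {L : List (Int × Int × Int)} (hcan : feasB L 0 1 = true) {p a : Int}
    (h : memB (L.map (fun t => (t.1 - t.2.2, t.2))) p a = true) : memB L p (a + 1) = true := by
  simp only [memB, Bool.or_eq_true, Bool.and_eq_true, beq_iff_eq, decide_eq_true_eq] at h ⊢
  rcases h with ⟨rfl, rfl⟩ | ⟨⟨hp, ha⟩, hf⟩
  · exact Or.inr ⟨⟨by omega, by omega⟩, by simpa using hcan⟩
  · exact Or.inr ⟨⟨hp, by omega⟩, by rw [← feas_shift_a]; exact hf⟩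

lemma mem_unshift_p {L : List (Int × Int × Int)} {q b : Int}
    (h : memB L q b = true) (hq : 1 ≤ q) : memB (L.map (fun t => (t.1 - t.2.1, t.2))) (q - 1) b = true := by
  simp only [memB, Bool.or_eq_true, Bool.and_eq_true, beq_iff_eq, decide_eq_true_eq] at h ⊢
  rcases h with ⟨rfl, rfl⟩ | ⟨⟨hp, ha⟩, hf⟩
  · omega
  · exact Or.inr ⟨⟨by omega, ha⟩, by rw [feas_shift_p]; simpa [sub_add_cancel] using hf⟩

lemma mem_unshift_a {L : List (Int × Int × Int)} {q b : Int}
    (h : memB L q b = true) (hb : 1 ≤ b) : memB (L.map (fun t => (t.1 - t.2.2, t.2))) q (b - 1) = true := by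
  simp only [memB, Bool.or_eq_true, Bool.and_eq_true, beq_iff_eq, decide_eq_true_eq] at h ⊢
  rcases h with ⟨rfl, rfl⟩ | ⟨⟨hp, ha⟩, hf⟩
  · omega
  · exact Or.inr ⟨⟨hp, by omega⟩, by rw [feas_shift_a]; simpa [sub_add_cancel] using hf⟩

lemma mem_can_p {L : List (Int × Int × Int)} (hL : InvL L) {q b : Int}
    (h : memB L q b = true) (hq : 1 ≤ q) : feasB L 1 0 = true := by
  simp only [memB, Bool.or_eq_true, Bool.and_eq_true, beq_iff_eq, decide_eq_true_eq] at h
  rcases h with ⟨rfl, rfl⟩ | ⟨⟨hp, ha⟩, hf⟩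
  · omega
  · rw [← can_eq_feas_p]; exact feas_can_p hL hf hq ha

lemma mem_can_a {L : List (Int × Int × Int)} (hL : InvL L) {q b : Int}
    (h : memB L q b = true) (hb : 1 ≤ b) : feasB L 0 1 = true := by
  simp only [memB, Bool.or_eq_true, Bool.and_eq_true, beq_iff_eq, decide_eq_true_eq] at h
  rcases h with ⟨rfl, rfl⟩ | ⟨⟨hp, ha⟩, hf⟩
  · omega
  · rw [← can_eq_feas_a]; exact feas_can_a hL hf hp hb

-- maximality transported from the pumpkin child: nothing with q ≥ 1 beats (pp+1, pa)
lemma pbranch_max {L : List (Int × Int × Int)} {pp pa : Int}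
    (hb : IsBest (L.map (fun t => (t.1 - t.2.1, t.2))) pp pa) :
    ∀ q b : Int, memB L q b = true → 1 ≤ q →
      (q + b < (pp + 1) + pa ∨ (q + b = (pp + 1) + pa ∧ q ≤ pp + 1)) := by
  intro q b h hq
  have := hb.2 (q - 1) b (mem_unshift_p h hq)
  omega

lemma abranch_max {L : List (Int × Int × Int)} {ap aa : Int}
    (hb : IsBest (L.map (fun t => (t.1 - t.2.2, t.2))) ap aa) :
    ∀ q b : Int, memB L q b = true → 1 ≤ b →
      (q + b < ap + (aa + 1) ∨ (q + b = ap + (aa + 1) ∧ q ≤ ap)) := by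
  intro q b h hbge
  have := hb.2 q (b - 1) (mem_unshift_a h hbge)
  omega

lemma dmFuel_correct : ∀ (f : Nat) (ing : List Int), 2 ≤ ing.length →
    (ing.getD 0 0).toNat + (ing.getD 1 0).toNat < f →
    ∃ p a : Int, dmFuel f ing = [p, a] ∧ IsBest (tri ing) p a := by
  intro f
  induction f with
  | zero => intro ing _ hm; omega
  | succ f ih =>
    intro ing hlen hm
    obtain ⟨x, y, tail, rfl⟩ : ∃ x y tail, ing = x :: y :: tail := by
      match ing, hlen with
      | x :: y :: t, _ => exact ⟨x, y, t, rfl⟩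
    simp only [List.getD_cons_zero, List.getD_cons_succ] at hm
    have hL : InvL (tri (x :: y :: tail)) := invL_tri _ hlen
    have hgd0 : (x :: y :: tail).getD 0 0 = x := rfl
    have hgd1 : (x :: y :: tail).getD 1 0 = y := rfl
    -- the two child states
    have hbakeP : bake (x :: y :: tail) pumpkin_pieA
        = (x - 1) :: (y - 0) :: (tail.zip [(3:Int), 4, 3]).map (fun ij => ij.1 - ij.2) := by
      simp [bake_eq_map, pumpkin_pieA]
    have hbakeA : bake (x :: y :: tail) apple_pieA
        = (x - 0) :: (y - 1) :: (tail.zip [(4:Int), 3, 2]).map (fun ij => ij.1 - ij.2) := by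
      simp [bake_eq_map, apple_pieA]
    have hcanPf : can_bake (x :: y :: tail) pumpkin_pieA = feasB (tri (x :: y :: tail)) 1 0 := by
      rw [can_bake_pumpkin, can_eq_feas_p]
    have hcanAf : can_bake (x :: y :: tail) apple_pieA = feasB (tri (x :: y :: tail)) 0 1 := by
      rw [can_bake_apple, can_eq_feas_a]
    simp only [dmFuel]
    cases hP : can_bake (x :: y :: tail) pumpkin_pieA with
    | true =>
      have hfP : feasB (tri (x :: y :: tail)) 1 0 = true := by rw [← hcanPf]; exact hP
      have hx1 : 1 ≤ x := by
        have : tri (x :: y :: tail) = (x, 1, 0) :: ((y, 0, 1) :: (tail.zip (PA.drop 2))) := by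
          simp [tri, PA]
        rw [this] at hfP
        simp [feasB] at hfP
        omega
      obtain ⟨pp, pa, hPval, hPbest⟩ := ih (bake (x :: y :: tail) pumpkin_pieA)
        (by rw [hbakeP]; simp) (by rw [hbakeP]; simp only [List.getD_cons_zero, List.getD_cons_succ]; omega)
      rw [tri_bake_pumpkin] at hPbest
      have hppn := mem_nonneg hPbest.1
      have hmemP : memB (tri (x :: y :: tail)) (pp + 1) pa = true := mem_shift_p hfP hPbest.1
      cases hA : can_bake (x :: y :: tail) apple_pieA with
      | true =>
        have hfA : feasB (tri (x :: y :: tail)) 0 1 = true := by rw [← hcanAf]; exact hA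
        have hy1 : 1 ≤ y := by
          have htr : tri (x :: y :: tail) = (x, 1, 0) :: ((y, 0, 1) :: (tail.zip (PA.drop 2))) := by
            simp [tri, PA]
          rw [htr] at hfA
          simp [feasB] at hfA
          omega
        obtain ⟨ap, aa, hAval, hAbest⟩ := ih (bake (x :: y :: tail) apple_pieA)
          (by rw [hbakeA]; simp) (by rw [hbakeA]; simp only [List.getD_cons_zero, List.getD_cons_succ]; omega)
        rw [tri_bake_apple] at hAbest
        have haan := mem_nonneg hAbest.1
        have hmemA : memB (tri (x :: y :: tail)) ap (aa + 1) = true := mem_shift_a hfA hAbest.1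
        rw [hPval, hAval]
        simp only [reduceIte, Bool.false_eq_true, if_false, List.getD_cons_zero, List.getD_cons_succ]
        by_cases hcmp : ap + (aa + 1) ≤ (pp + 1) + pa
        · rw [if_pos (by omega : ap + (aa + 1) ≤ pp + 1 + pa)]
          refine ⟨pp + 1, pa, rfl, hmemP, ?_⟩
          intro q b hqb
          have hqbn := mem_nonneg hqb
          rcases (by omega : 1 ≤ q ∨ (q = 0 ∧ 1 ≤ b) ∨ (q = 0 ∧ b = 0)) with hq | ⟨rfl, hb⟩ | ⟨rfl, rfl⟩
          · exact pbranch_max hPbest q b hqb hq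
          · have := abranch_max hAbest 0 b hqb hb
            omega
          · omega
        · rw [if_neg (by omega : ¬ (ap + (aa + 1) ≤ pp + 1 + pa))]
          refine ⟨ap, aa + 1, rfl, hmemA, ?_⟩
          intro q b hqb
          have hqbn := mem_nonneg hqb
          rcases (by omega : 1 ≤ q ∨ (q = 0 ∧ 1 ≤ b) ∨ (q = 0 ∧ b = 0)) with hq | ⟨rfl, hb⟩ | ⟨rfl, rfl⟩
          · have := pbranch_max hPbest q b hqb hq
            omega
          · exact abranch_max hAbest 0 b hqb hb
          · omega
      | false =>
        rw [hPval]
        simp only [reduceIte, Bool.false_eq_true, if_false, List.getD_cons_zero, List.getD_cons_succ]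
        rw [if_pos (by omega : (0:Int) + 0 ≤ pp + 1 + pa)]
        refine ⟨pp + 1, pa, rfl, hmemP, ?_⟩
        intro q b hqb
        have hqbn := mem_nonneg hqb
        rcases (by omega : 1 ≤ q ∨ (q = 0 ∧ 1 ≤ b) ∨ (q = 0 ∧ b = 0)) with hq | ⟨rfl, hb⟩ | ⟨rfl, rfl⟩
        · exact pbranch_max hPbest q b hqb hq
        · exact absurd (mem_can_a hL hqb hb) (by rw [← hcanAf]; simp [hA])
        · omega
    | false =>
      cases hA : can_bake (x :: y :: tail) apple_pieA with
      | true =>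
        have hfA : feasB (tri (x :: y :: tail)) 0 1 = true := by rw [← hcanAf]; exact hA
        have hy1 : 1 ≤ y := by
          have : tri (x :: y :: tail) = (x, 1, 0) :: ((y, 0, 1) :: (tail.zip (PA.drop 2))) := by
            simp [tri, PA]
          rw [this] at hfA
          simp [feasB] at hfA
          omega
        obtain ⟨ap, aa, hAval, hAbest⟩ := ih (bake (x :: y :: tail) apple_pieA)
          (by rw [hbakeA]; simp) (by rw [hbakeA]; simp only [List.getD_cons_zero, List.getD_cons_succ]; omega)
        rw [tri_bake_apple] at hAbest
        have haan := mem_nonneg hAbest.1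
        have hmemA : memB (tri (x :: y :: tail)) ap (aa + 1) = true := mem_shift_a hfA hAbest.1
        rw [hAval]
        simp only [reduceIte, Bool.false_eq_true, if_false, List.getD_cons_zero, List.getD_cons_succ]
        rw [if_neg (by omega : ¬ (ap + (aa + 1) ≤ (0:Int) + 0))]
        refine ⟨ap, aa + 1, rfl, hmemA, ?_⟩
        intro q b hqb
        have hqbn := mem_nonneg hqb
        rcases (by omega : 1 ≤ q ∨ (q = 0 ∧ 1 ≤ b) ∨ (q = 0 ∧ b = 0)) with hq | ⟨rfl, hb⟩ | ⟨rfl, rfl⟩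
        · exact absurd (mem_can_p hL hqb hq) (by rw [← hcanPf]; simp [hP])
        · exact abranch_max hAbest 0 b hqb hb
        · omega
      | false =>
        simp only [reduceIte, Bool.false_eq_true, if_false, List.getD_cons_zero, List.getD_cons_succ]
        rw [if_pos (by omega : (0:Int) + 0 ≤ 0 + 0)]
        refine ⟨0, 0, rfl, mem_zero, ?_⟩
        intro q b hqb
        have hqbn := mem_nonneg hqb
        rcases (by omega : 1 ≤ q ∨ (q = 0 ∧ 1 ≤ b) ∨ (q = 0 ∧ b = 0)) with hq | ⟨rfl, hb⟩ | ⟨rfl, rfl⟩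
        · exact absurd (mem_can_p hL hqb hq) (by rw [← hcanPf]; simp [hP])
        · exact absurd (mem_can_a hL hqb hb) (by rw [← hcanAf]; simp [hA])
        · omega

-- ---- B's loop computes the same lexicographic maximum ----

lemma tri_length (ing : List Int) : (tri ing).length = min ing.length 5 := by
  simp [tri, PA]

lemma pget {k : Nat} (hk : k < 5) :
    pumpkin_pieA.getD k 0 = (PA[k]'(by simpa [PA] using hk)).1 := by
  interval_cases k <;> rfl

lemma aget {k : Nat} (hk : k < 5) :
    apple_pieA.getD k 0 = (PA[k]'(by simpa [PA] using hk)).2 := by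
  interval_cases k <;> rfl

-- feasibility of (p, a), read off by index instead of by membership
lemma feas_iff_index (ing : List Int) (p a : Int) :
    feasB (tri ing) p a = true ↔
      ∀ k, (hk : k < min ing.length 5) →
        p * pumpkin_pieA.getD k 0 + a * apple_pieA.getD k 0 ≤ ing.getD k 0 := by
  unfold feasB
  rw [List.all_eq_true]
  constructor
  · intro h k hk
    have hk' : k < (tri ing).length := by rw [tri_length]; exact hk
    have hk5 : k < 5 := by omega
    have hkl : k < ing.length := by omega
    have := h ((tri ing)[k]'hk') (List.getElem_mem hk')
    rw [decide_eq_true_eq] at this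
    have hget : (tri ing)[k]'hk' = (ing[k]'hkl, PA[k]'(by simpa [PA] using hk5)) := by
      simp [tri, List.getElem_zip]
    rw [hget] at this
    rw [pget hk5, aget hk5, List.getD_eq_getElem ing 0 hkl]
    exact this
  · intro h t ht
    rw [decide_eq_true_eq]
    obtain ⟨k, hk', hkt⟩ := List.mem_iff_getElem.mp ht
    have hk : k < min ing.length 5 := by rw [← tri_length]; exact hk'
    have hk5 : k < 5 := by omega
    have hkl : k < ing.length := by omega
    have hget : (tri ing)[k]'hk' = (ing[k]'hkl, PA[k]'(by simpa [PA] using hk5)) := by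
      simp [tri, List.getElem_zip]
    rw [← hkt, hget]
    have := h k hk
    rw [pget hk5, aget hk5, List.getD_eq_getElem ing 0 hkl] at this
    exact this

-- B's loop guard is feasibility of (p, 0)
lemma cond_eq_feas (ing : List Int) (p : Int) :
    ((List.range (min ing.length 5)).all
        (fun k => decide (0 ≤ ing.getD k 0 - p * pumpkin_pieA.getD k 0)))
      = feasB (tri ing) p 0 := by
  rw [Bool.eq_iff_iff, List.all_eq_true, feas_iff_index]
  constructor
  · intro h k hk
    have := h k (List.mem_range.mpr hk)
    rw [decide_eq_true_eq] at this
    linarith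
  · intro h k hk
    rw [decide_eq_true_eq]
    have := h k (List.mem_range.mp hk)
    linarith

-- B's per-p apple count is the largest feasible one
lemma amax_spec (ing : List Int) (hlen : 2 ≤ ing.length) (p aval : Int)
    (hfeas : feasB (tri ing) p 0 = true)
    (ha : aval = ((((List.range (min ing.length 5)).filter
        (fun k => decide (0 < apple_pieA.getD k 0))).map
        (fun k => PySem.Int.floordiv (ing.getD k 0 - p * pumpkin_pieA.getD k 0)
          (apple_pieA.getD k 0))).min?).getD 0) :
    0 ≤ aval ∧ feasB (tri ing) p aval = true ∧
      ∀ b : Int, 0 ≤ b → feasB (tri ing) p b = true → b ≤ aval := by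
  have hidx := (feas_iff_index ing p 0).mp hfeas
  have h1n : 1 < min ing.length 5 := by omega
  have h1f : (1 : Nat) ∈ (List.range (min ing.length 5)).filter
      (fun k => decide (0 < apple_pieA.getD k 0)) := by
    rw [List.mem_filter]
    exact ⟨List.mem_range.mpr h1n, by decide⟩
  have hne : (((List.range (min ing.length 5)).filter
      (fun k => decide (0 < apple_pieA.getD k 0))).map
      (fun k => PySem.Int.floordiv (ing.getD k 0 - p * pumpkin_pieA.getD k 0)
        (apple_pieA.getD k 0))) ≠ [] := by
    intro hnil
    exact absurd (List.mem_map_of_mem h1f) (by rw [hnil]; simp)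
  obtain ⟨m, hm⟩ : ∃ m, (((List.range (min ing.length 5)).filter
      (fun k => decide (0 < apple_pieA.getD k 0))).map
      (fun k => PySem.Int.floordiv (ing.getD k 0 - p * pumpkin_pieA.getD k 0)
        (apple_pieA.getD k 0))).min? = some m := by
    cases hmin : (((List.range (min ing.length 5)).filter
        (fun k => decide (0 < apple_pieA.getD k 0))).map
        (fun k => PySem.Int.floordiv (ing.getD k 0 - p * pumpkin_pieA.getD k 0)
          (apple_pieA.getD k 0))).min? with
    | none => exact absurd (List.min?_eq_none_iff.mp hmin) hne
    | some m => exact ⟨m, rfl⟩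
  obtain ⟨hmmem, hmle⟩ := List.min?_eq_some_iff.mp hm
  have haval : aval = m := by rw [ha, hm]; rfl
  -- every element of the mapped list is nonnegative, so is the min
  have hnn : 0 ≤ m := by
    obtain ⟨k, hkf, hkm⟩ := List.mem_map.mp hmmem
    rw [List.mem_filter, List.mem_range, decide_eq_true_eq] at hkf
    have hk := hkf.1
    have haj := hkf.2
    have := hidx k hk
    rw [← hkm]
    rw [PySem.Int.le_floordiv_iff_mul_le haj]
    nlinarith
  refine ⟨by omega, ?_, ?_⟩
  · -- (p, m) is feasible
    rw [haval, feas_iff_index]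
    intro k hk
    have hk5 : k < 5 := by omega
    by_cases haj : 0 < apple_pieA.getD k 0
    · have hkmem : k ∈ (List.range (min ing.length 5)).filter
          (fun j => decide (0 < apple_pieA.getD j 0)) := by
        rw [List.mem_filter, List.mem_range]
        exact ⟨hk, decide_eq_true haj⟩
      have := hmle _ (List.mem_map_of_mem hkmem)
      rw [PySem.Int.le_floordiv_iff_mul_le haj] at this
      linarith
    · have haj0 : apple_pieA.getD k 0 = 0 := by
        have : 0 ≤ apple_pieA.getD k 0 := by interval_cases k <;> decide
        omega
      have := hidx k hk
      rw [haj0]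
      linarith
  · -- maximality
    intro b hb hfb
    have hbidx := (feas_iff_index ing p b).mp hfb
    rw [haval]
    obtain ⟨k, hkf, hkm⟩ := List.mem_map.mp hmmem
    -- b is below every element of the list, hence below the min m
    have hble : ∀ z ∈ (((List.range (min ing.length 5)).filter
        (fun k => decide (0 < apple_pieA.getD k 0))).map
        (fun k => PySem.Int.floordiv (ing.getD k 0 - p * pumpkin_pieA.getD k 0)
          (apple_pieA.getD k 0))), b ≤ z := by
      intro z hz
      obtain ⟨j, hjf, hjz⟩ := List.mem_map.mp hz
      rw [List.mem_filter, List.mem_range, decide_eq_true_eq] at hjf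
      have := hbidx j hjf.1
      rw [← hjz, PySem.Int.le_floordiv_iff_mul_le hjf.2]
      linarith
    exact hble m hmmem

lemma altLoop_correct (ing : List Int) (hlen : 2 ≤ ing.length) :
    ∀ (f : Nat) (p : Int) (best : Int × Int),
      0 ≤ p →
      p = ((ing.getD 0 0).toNat + 1 : Int) - f →
      best.1 ≤ p →
      memB (tri ing) best.1 best.2 = true →
      (∀ q b : Int, memB (tri ing) q b = true → q < p →
        (q + b < best.1 + best.2 ∨ (q + b = best.1 + best.2 ∧ q ≤ best.1))) →
      IsBest (tri ing) (altLoop ing (min ing.length 5) f p best).1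
        (altLoop ing (min ing.length 5) f p best).2 := by
  have hL : InvL (tri ing) := invL_tri ing hlen
  obtain ⟨i0, i1, rest, hshape⟩ := invL_get1 hL
  have hi0 : ing.getD 0 0 = i0 := by
    obtain ⟨x, y, t, rfl⟩ : ∃ x y t, ing = x :: y :: t := by
      match ing, hlen with
      | x :: y :: t, _ => exact ⟨x, y, t, rfl⟩
    have : tri (x :: y :: t) = (x, 1, 0) :: ((y, 0, 1) :: (t.zip (PA.drop 2))) := by
      simp [tri, PA]
    rw [this] at hshape
    have h2 := congrArg (fun l => l.headI.1) hshape
    simp only [List.headI] at h2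
    simp [h2]
  intro f
  induction f with
  | zero =>
    intro p best h0p hpf hb1 hmem hmax
    simp only [altLoop]
    refine ⟨hmem, ?_⟩
    intro q b hqb
    have hqbn := mem_nonneg hqb
    have hqlt : q < p := by
      by_contra hge
      simp only [memB, Bool.or_eq_true, Bool.and_eq_true, beq_iff_eq, decide_eq_true_eq] at hqb
      rcases hqb with ⟨rfl, rfl⟩ | ⟨⟨_, _⟩, hf⟩
      · push_cast at hpf; omega
      · have hqi0 : q ≤ i0 := feas_bound_p hshape hf
        have : i0 ≤ (i0.toNat : Int) := Int.self_le_toNat i0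
        rw [hi0] at hpf
        omega
    exact hmax q b hqb hqlt
  | succ f ihf =>
    intro p best h0p hpf hb1 hmem hmax
    simp only [altLoop]
    cases hc : (List.range (min ing.length 5)).all
        (fun k => decide (0 ≤ ing.getD k 0 - p * pumpkin_pieA.getD k 0)) with
    | false =>
      simp only [Bool.false_eq_true, if_false]
      refine ⟨hmem, ?_⟩
      intro q b hqb
      have hqbn := mem_nonneg hqb
      have hbn := mem_nonneg hmem
      by_cases hqlt : q < p
      · exact hmax q b hqb hqlt
      · -- q ≥ p: impossible unless (q,b) = (0,0) with p = 0
        simp only [memB, Bool.or_eq_true, Bool.and_eq_true, beq_iff_eq, decide_eq_true_eq] at hqb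
        rcases hqb with ⟨rfl, rfl⟩ | ⟨⟨hq0, hb0⟩, hf⟩
        · omega
        · exfalso
          have hq0' : feasB (tri ing) q 0 = true := feas_drop_a hL hf hb0
          have : feasB (tri ing) p 0 = true := feas_mono_p hL hq0' h0p (by omega)
          rw [← cond_eq_feas] at this
          rw [hc] at this
          exact Bool.false_ne_true this
    | true =>
      have hfeas : feasB (tri ing) p 0 = true := by rw [← cond_eq_feas]; exact hc
      set A := ((((List.range (min ing.length 5)).filter
          (fun k => decide (0 < apple_pieA.getD k 0))).map
          (fun k => PySem.Int.floordiv (ing.getD k 0 - p * pumpkin_pieA.getD k 0)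
            (apple_pieA.getD k 0))).min?).getD 0 with hAdef
      obtain ⟨han, hafeas, hamax⟩ := amax_spec ing hlen p A hfeas hAdef
      have hpmem : memB (tri ing) p A = true := by
        simp only [memB, Bool.or_eq_true, Bool.and_eq_true, beq_iff_eq, decide_eq_true_eq]
        exact Or.inr ⟨⟨h0p, han⟩, hafeas⟩
      apply ihf (p + 1) _ (by omega) (by push_cast at hpf ⊢; omega)
      · -- new best's first component is ≤ p + 1
        split
        · omega
        · omega
      · -- new best is a member
        split
        · exact hpmem
        · exact hmem
      · -- new best dominates everything with q < p + 1
        intro q b hqb hlt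
        have hqbn := mem_nonneg hqb
        have hfb : q = p → b ≤ A := by
          intro rfl'
          simp only [memB, Bool.or_eq_true, Bool.and_eq_true, beq_iff_eq, decide_eq_true_eq] at hqb
          rcases hqb with ⟨_, rfl⟩ | ⟨⟨_, hb0⟩, hf⟩
          · omega
          · subst rfl'; exact hamax b hb0 hf
        split
        case isTrue hcond =>
          by_cases hqlt : q < p
          · have := hmax q b hqb hqlt
            dsimp only
            omega
          · have hqp : q = p := by omega
            have := hfb hqp
            dsimp only
            omega
        case isFalse hcond =>
          by_cases hqlt : q < p
          · exact hmax q b hqb hqlt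
          · have hqp : q = p := by omega
            have := hfb hqp
            left
            omega

lemma alt_correct (ing : List Int) (hlen : 2 ≤ ing.length) :
    ∃ p a : Int, determine_max_alt ing = [p, a] ∧ IsBest (tri ing) p a := by
  have h := altLoop_correct ing hlen ((ing.getD 0 0).toNat + 1) 0 (0, 0)
    le_rfl (by push_cast; ring) le_rfl mem_zero
    (by intro q b hqb hlt; have := mem_nonneg hqb; omega)
  exact ⟨_, _, rfl, h⟩

-- ===== VERDICT (by name: the statement is the Claim_ definition above) =====
theorem determine_max_spec : Claim_equal_determine_max := by
  intro ing _hdom hpre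
  unfold Spec_determine_max
  obtain ⟨p, a, hA, hAb⟩ := dmFuel_correct ((ing.getD 0 0).toNat + (ing.getD 1 0).toNat + 1)
    ing hpre (by omega)
  obtain ⟨p', a', hB, hBb⟩ := alt_correct ing hpre
  obtain ⟨hp, ha⟩ := isBest_unique hAb hBb
  rw [determine_max, hA, hB, hp, ha]
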